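-- pv_equiv track=rewrite | github.com/Rozichka-Bel/Diplome-Thesis-Python | takeoff_tree/takeoff_tree/takeoff_tree.py | display_function
-- ===== SOURCE A (Python) =====
-- def get_variable_name(index, objective):
--     return f"{'x' if objective == 'min' else 'y'}{index + 1}"
--
-- def display_function(coeffs, objective, free_coeff):
--     var_prefix = "y" if objective == "max" else "x"
--     terms = [f"{coeff}*{get_variable_name(i, objective)}" for i, coeff in enumerate(coeffs)]
--     objective_str = "Максимизация" if objective == "max" else "Минимизация"
--
--     # Присъединяване на свободния член само ако е различен от 0
--     if free_coeff != 0: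
--         free_coeff_str = f" + {free_coeff}" if free_coeff > 0 else f" - {-free_coeff}"
--     else:
--         free_coeff_str = ""
--
--     return f"{objective_str} на: " + " + ".join(terms).replace('+ -', '- ') + free_coeff_str
-- ===== SOURCE B (Python) =====
-- def display_function(coeffs, objective, free_coeff):
--     objective_str = "Максимизация" if objective == "max" else "Минимизация"
--     body = ""
--     for i, coeff in enumerate(coeffs):
--         term = f"{coeff}*{'x' if objective == 'min' else 'y'}{i + 1}"
--         if not body:
--             body = term
--         elif term.startswith('-'):
--             body += " - " + term[1:]
--         else:
--             body += " + " + term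
--     if free_coeff > 0:
--         body += f" + {free_coeff}"
--     elif free_coeff != 0:
--         body += f" - {-free_coeff}"
--     return f"{objective_str} на: " + body
-- ===== Notes on version B (the rewrite author's own statement) =====
-- stated objective: simpler
-- what changed: Replaces the comprehension + ' + '.join + global '.replace("+ -","- ")' pipeline with one incremental loop that renders each term and appends ' - '+term[1:] or ' + '+term depending on the term's leading character, so no term list and no global string replace exist.
import Mathlib
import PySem

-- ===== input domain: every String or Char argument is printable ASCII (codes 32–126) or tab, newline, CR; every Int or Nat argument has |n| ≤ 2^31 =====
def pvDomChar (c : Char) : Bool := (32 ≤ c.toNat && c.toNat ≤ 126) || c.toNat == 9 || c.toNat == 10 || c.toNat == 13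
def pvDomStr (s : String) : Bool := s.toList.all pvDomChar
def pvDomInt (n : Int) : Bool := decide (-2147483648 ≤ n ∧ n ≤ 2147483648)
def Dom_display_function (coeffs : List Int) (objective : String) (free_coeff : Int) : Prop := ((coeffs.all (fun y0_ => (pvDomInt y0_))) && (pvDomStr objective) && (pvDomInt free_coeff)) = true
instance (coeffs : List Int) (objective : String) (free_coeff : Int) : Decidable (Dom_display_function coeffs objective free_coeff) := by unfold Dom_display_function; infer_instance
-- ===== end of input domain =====

-- B replaces A's comprehension + " + ".join + global replace('+ -','- ') pipeline by one
-- incremental loop that appends " - "+term[1:] or " + "+term depending on the term's leading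
-- character (objective: simpler; same cost).

-- ===== PORT A =====
-- helper: get_variable_name(index, objective)
def get_variable_name (index : Int) (objective : String) : List Char :=
  (if objective == "min" then ['x'] else ['y']) ++ PySem.Int.toChars (index + 1)

def display_function (coeffs : List Int) (objective : String) (free_coeff : Int) : String :=
  let terms : List (List Char) :=
    (PySem.List.enumerate coeffs 0).map
      (fun p => PySem.Int.toChars p.2 ++ ['*'] ++ get_variable_name p.1 objective)
  let objectiveStr : List Char :=
    if objective == "max" then "Максимизация".toList else "Минимизация".toList
  let freeCoeffStr : List Char :=
    if free_coeff ≠ 0 then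
      (if free_coeff > 0 then [' ', '+', ' '] ++ PySem.Int.toChars free_coeff
       else [' ', '-', ' '] ++ PySem.Int.toChars (-free_coeff))
    else []
  String.ofList (objectiveStr ++ " на: ".toList ++
    PySem.Chars.replace (PySem.Chars.join [' ', '+', ' '] terms) ['+', ' ', '-'] ['-', ' '] ++
    freeCoeffStr)

-- ===== PORT B =====
def display_function_alt (coeffs : List Int) (objective : String) (free_coeff : Int) : String :=
  let objectiveStr : List Char :=
    if objective == "max" then "Максимизация".toList else "Минимизация".toList
  let body : List Char :=
    (PySem.List.enumerate coeffs 0).foldl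
      (fun body p =>
        let term := PySem.Int.toChars p.2 ++ ['*'] ++
          (if objective == "min" then ['x'] else ['y']) ++ PySem.Int.toChars (p.1 + 1)
        if body.isEmpty then term
        else if PySem.Chars.startswith term ['-'] then
          body ++ [' ', '-', ' '] ++ PySem.List.slice term (some 1) none
        else body ++ [' ', '+', ' '] ++ term) []
  let body2 : List Char :=
    if free_coeff > 0 then body ++ [' ', '+', ' '] ++ PySem.Int.toChars free_coeff
    else if free_coeff ≠ 0 then body ++ [' ', '-', ' '] ++ PySem.Int.toChars (-free_coeff)
    else body
  String.ofList (objectiveStr ++ " на: ".toList ++ body2)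

-- ===== PRECONDITION & SPEC =====
def Spec_display_function (coeffs : List Int) (objective : String) (free_coeff : Int) (out : String) : Prop := out = display_function_alt coeffs objective free_coeff
instance (coeffs : List Int) (objective : String) (free_coeff : Int) (out : String) : Decidable (Spec_display_function coeffs objective free_coeff out) := by unfold Spec_display_function; infer_instance

-- ===== CLAIM (what is proved, stated in full; the proofs are below) =====
def Claim_equal_display_function : Prop := ∀ (coeffs : List Int) (objective : String) (free_coeff : Int), Dom_display_function coeffs objective free_coeff → Spec_display_function coeffs objective free_coeff (display_function coeffs objective free_coeff)

-- ===== LEMMAS AND PROOFS =====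

-- the result of .replace('+ -', '- ') as a one-pass recursion
def pvRepl : List Char → List Char
  | '+' :: ' ' :: '-' :: t => '-' :: ' ' :: pvRepl t
  | c :: t => c :: pvRepl t
  | [] => []

theorem pvRepl_cons_ne (c : Char) (t : List Char) (h : c ≠ '+') :
    pvRepl (c :: t) = c :: pvRepl t := by
  rw [pvRepl.eq_def]
  split
  · rename_i heq; injection heq with h1 _; exact (h h1).elim
  · rename_i heq; injection heq with h1 h2; rw [h1, h2]
  · rename_i heq; exact absurd heq (List.cons_ne_nil _ _)

theorem pvRepl_plus_ne (c : Char) (t : List Char) (h : c ≠ '-') :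
    pvRepl ('+' :: ' ' :: c :: t) = '+' :: ' ' :: pvRepl (c :: t) := by
  rw [pvRepl.eq_def]
  split
  · rename_i heq
    injection heq with _ h2; injection h2 with _ h3; injection h3 with h4 _
    exact (h h4).elim
  · rename_i heq; injection heq with h1 h2; rw [← h1, ← h2]
    rw [pvRepl_cons_ne _ _ (by decide)]
  · rename_i heq; exact absurd heq (List.cons_ne_nil _ _)

theorem pvRepl_not_pre (c : Char) (t : List Char)
    (hp : List.isPrefixOf ['+', ' ', '-'] (c :: t) = false) :
    pvRepl (c :: t) = c :: pvRepl t := by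
  rw [pvRepl.eq_def]
  split
  · rename_i heq
    injection heq with h1 h2
    subst h1; subst h2
    simp [List.isPrefixOf] at hp
  · rename_i heq; injection heq with h1 h2; rw [h1, h2]
  · rename_i heq; exact absurd heq (List.cons_ne_nil _ _)

theorem pvRepl_append (s r : List Char) (h : '+' ∉ s) : pvRepl (s ++ r) = s ++ pvRepl r := by
  induction s with
  | nil => rfl
  | cons c t ih =>
      rw [List.cons_append, pvRepl_cons_ne c _ (fun hc => h (hc ▸ List.mem_cons_self))]
      rw [ih (fun hm => h (List.mem_cons_of_mem _ hm))]
      rfl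

theorem pvGo_cons (f : Nat) (c : Char) (t acc : List Char) :
    PySem.Chars.replace.go ['+', ' ', '-'] ['-', ' '] (f+1) (c :: t) acc =
    (if List.isPrefixOf ['+', ' ', '-'] (c :: t) = true
     then PySem.Chars.replace.go ['+', ' ', '-'] ['-', ' '] f (List.drop 3 (c :: t)) ([' ', '-'] ++ acc)
     else PySem.Chars.replace.go ['+', ' ', '-'] ['-', ' '] f t (c :: acc)) := by
  rw [PySem.Chars.replace.go.eq_def]
  rfl

theorem pvGo_eq (fuel : Nat) (l acc : List Char) (h : l.length ≤ fuel) :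
    PySem.Chars.replace.go ['+', ' ', '-'] ['-', ' '] fuel l acc = acc.reverse ++ pvRepl l := by
  induction fuel generalizing l acc with
  | zero =>
      have hl : l = [] := List.eq_nil_of_length_eq_zero (Nat.le_zero.mp h)
      subst hl
      rw [PySem.Chars.replace.go.eq_def]
      simp [pvRepl]
  | succ f ih =>
      match l with
      | [] =>
          rw [PySem.Chars.replace.go.eq_def]
          simp [pvRepl]
      | c :: t =>
          rw [pvGo_cons]
          by_cases hp : List.isPrefixOf ['+', ' ', '-'] (c :: t) = true
          · rw [if_pos hp]
            obtain ⟨u, hu⟩ := List.isPrefixOf_iff_prefix.mp hp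
            have hl : c :: t = '+' :: ' ' :: '-' :: u := hu.symm
            rw [hl] at h ⊢
            have hlen : u.length ≤ f := by simp at h; omega
            have hdrop : List.drop 3 ('+' :: ' ' :: '-' :: u) = u := rfl
            rw [hdrop, ih _ _ hlen]
            have : pvRepl ('+' :: ' ' :: '-' :: u) = '-' :: ' ' :: pvRepl u := rfl
            rw [this]
            simp
          · rw [if_neg hp]
            have hlen : t.length ≤ f := by simp at h; omega
            rw [ih _ _ hlen]
            rw [pvRepl_not_pre c t (Bool.not_eq_true _ ▸ eq_false_of_ne_true hp)]
            simp

theorem pvReplace_eq (s : List Char) :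
    PySem.Chars.replace s ['+', ' ', '-'] ['-', ' '] = pvRepl s := by
  unfold PySem.Chars.replace
  rw [if_neg (by decide)]
  rw [pvGo_eq s.length s [] le_rfl]
  rfl

-- B's rendering of the non-first terms
def pvTailPart : List (List Char) → List Char
  | [] => []
  | t :: ts =>
      (if t.head? = some '-' then [' ', '-', ' '] ++ t.tail else [' ', '+', ' '] ++ t) ++
      pvTailPart ts

theorem pvRepl_sep (r X : List Char) (hne : r ≠ []) (hp : '+' ∉ r) :
    pvRepl ([' ', '+', ' '] ++ r ++ X) =
      (if r.head? = some '-' then [' ', '-', ' '] ++ r.tail else [' ', '+', ' '] ++ r) ++ pvRepl X := by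
  match r with
  | [] => exact absurd rfl hne
  | c :: t =>
      have hpt : '+' ∉ t := fun hm => hp (List.mem_cons_of_mem _ hm)
      have hshape : ([' ', '+', ' '] : List Char) ++ (c :: t) ++ X =
          ' ' :: '+' :: ' ' :: c :: (t ++ X) := by simp
      rw [hshape, pvRepl_cons_ne ' ' _ (by decide)]
      by_cases hc : c = '-'
      · subst hc
        have h1 : pvRepl ('+' :: ' ' :: '-' :: (t ++ X)) = '-' :: ' ' :: pvRepl (t ++ X) := rfl
        rw [h1, pvRepl_append t X hpt]
        simp
      · rw [pvRepl_plus_ne c _ hc]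
        have h2 : c :: (t ++ X) = (c :: t) ++ X := rfl
        rw [h2, pvRepl_append (c :: t) X hp]
        have hhd : ¬ ((c :: t).head? = some '-') := by
          simp [hc]
        rw [if_neg hhd]
        simp

def pvJoinRest (ts : List (List Char)) : List Char :=
  (ts.map (fun t => [' ', '+', ' '] ++ t)).flatten

theorem pvJoin_eq (t0 : List Char) (ts : List (List Char)) :
    PySem.Chars.join [' ', '+', ' '] (t0 :: ts) = t0 ++ pvJoinRest ts := by
  induction ts generalizing t0 with
  | nil => rw [PySem.Chars.join_singleton]; simp [pvJoinRest]
  | cons t1 ts ih =>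
      rw [PySem.Chars.join_cons_cons, ih t1]
      simp [pvJoinRest]

theorem pvRepl_joinRest (ts : List (List Char)) (h : ∀ t ∈ ts, t ≠ [] ∧ '+' ∉ t) :
    pvRepl (pvJoinRest ts) = pvTailPart ts := by
  induction ts with
  | nil => rfl
  | cons t ts ih =>
      have hshape : pvJoinRest (t :: ts) = [' ', '+', ' '] ++ t ++ pvJoinRest ts := by
        simp [pvJoinRest]
      rw [hshape, pvRepl_sep t (pvJoinRest ts) (h t List.mem_cons_self).1 (h t List.mem_cons_self).2]
      rw [ih (fun u hu => h u (List.mem_cons_of_mem _ hu))]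
      rfl

theorem toChars_ne_nil (n : Int) : PySem.Int.toChars n ≠ [] := by
  unfold PySem.Int.toChars
  split
  · exact List.cons_ne_nil _ _
  · exact List.ne_nil_of_length_pos Nat.length_toDigits_pos

theorem isDigit_of_mem_digits {c : Char} {m : Nat} (h : c ∈ Nat.toDigits 10 m) :
    c.isDigit = true :=
  Nat.isDigit_of_mem_toDigits (by norm_num) (by norm_num) h

theorem plus_not_mem_toChars (n : Int) : '+' ∉ PySem.Int.toChars n := by
  unfold PySem.Int.toChars
  split
  · intro hm
    rcases List.mem_cons.mp hm with h1 | h2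
    · exact absurd h1 (by decide)
    · have := isDigit_of_mem_digits h2; simp at this
  · intro hm
    have := isDigit_of_mem_digits hm; simp at this

theorem head?_toChars (n : Int) : ((PySem.Int.toChars n).head? = some '-') ↔ n < 0 := by
  unfold PySem.Int.toChars
  split
  · rename_i hn; simp [hn]
  · rename_i hn
    constructor
    · intro hh
      cases hd : Nat.toDigits 10 n.toNat with
      | nil => exact absurd hd (List.ne_nil_of_length_pos Nat.length_toDigits_pos)
      | cons d ds =>
          rw [hd] at hh
          have hdm : d ∈ Nat.toDigits 10 n.toNat := hd ▸ List.mem_cons_self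
          have := isDigit_of_mem_digits hdm
          simp at hh
          rw [hh] at this
          simp at this
    · intro hlt; exact absurd hlt hn

-- the common term shape
def pvTrm (objective : String) (p : Int × Int) : List Char :=
  PySem.Int.toChars p.2 ++ ['*'] ++
    ((if objective == "min" then ['x'] else ['y']) ++ PySem.Int.toChars (p.1 + 1))

theorem pvTrm_ne_nil (objective : String) (p : Int × Int) : pvTrm objective p ≠ [] := by
  unfold pvTrm
  intro h
  rcases List.append_eq_nil_iff.mp h with ⟨h1, _⟩
  rcases List.append_eq_nil_iff.mp h1 with ⟨_, h2⟩
  exact absurd h2 (List.cons_ne_nil _ _)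

theorem plus_not_mem_pvTrm (objective : String) (p : Int × Int) : '+' ∉ pvTrm objective p := by
  unfold pvTrm
  intro hm
  rcases List.mem_append.mp hm with h1 | h2
  · rcases List.mem_append.mp h1 with h3 | h4
    · exact plus_not_mem_toChars _ h3
    · simp at h4
  · rcases List.mem_append.mp h2 with h3 | h4
    · split at h3 <;> simp at h3
    · exact plus_not_mem_toChars _ h4

theorem head?_pvTrm (objective : String) (p : Int × Int) :
    (pvTrm objective p).head? = (PySem.Int.toChars p.2).head? := by
  unfold pvTrm
  rw [List.append_assoc, List.head?_append]
  cases hd : PySem.Int.toChars p.2 with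
  | nil => exact absurd hd (toChars_ne_nil _)
  | cons d ds => rfl

theorem startswith_pvTrm (objective : String) (p : Int × Int) :
    PySem.Chars.startswith (pvTrm objective p) ['-'] = decide (p.2 < 0) := by
  by_cases hneg : p.2 < 0
  · simp only [hneg, decide_true]
    rw [PySem.Chars.startswith_iff]
    have hh : (pvTrm objective p).head? = some '-' := by
      rw [head?_pvTrm, head?_toChars]; exact hneg
    cases ht : pvTrm objective p with
    | nil => exact absurd ht (pvTrm_ne_nil _ _)
    | cons c t =>
        rw [ht] at hh
        simp at hh
        rw [hh]
        exact ⟨t, rfl⟩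
  · simp only [hneg, decide_false]
    rw [Bool.eq_false_iff]
    intro hsw
    have hpre := (PySem.Chars.startswith_iff _ _).mp hsw
    obtain ⟨u, hu⟩ := hpre
    have hh : (pvTrm objective p).head? = some '-' := by rw [← hu]; rfl
    rw [head?_pvTrm, head?_toChars] at hh
    exact hneg hh

-- B's foldl over a nonempty accumulator produces the tail rendering
theorem pvFold_invariant (objective : String) (l : List (Int × Int)) (acc : List Char)
    (hacc : acc ≠ []) :
    l.foldl
      (fun body p =>
        if body.isEmpty then
          PySem.Int.toChars p.2 ++ ['*'] ++
            (if objective == "min" then ['x'] else ['y']) ++ PySem.Int.toChars (p.1 + 1)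
        else if PySem.Chars.startswith
            (PySem.Int.toChars p.2 ++ ['*'] ++
              (if objective == "min" then ['x'] else ['y']) ++ PySem.Int.toChars (p.1 + 1)) ['-'] then
          body ++ [' ', '-', ' '] ++ PySem.List.slice
            (PySem.Int.toChars p.2 ++ ['*'] ++
              (if objective == "min" then ['x'] else ['y']) ++ PySem.Int.toChars (p.1 + 1)) (some 1) none
        else body ++ [' ', '+', ' '] ++
          (PySem.Int.toChars p.2 ++ ['*'] ++
            (if objective == "min" then ['x'] else ['y']) ++ PySem.Int.toChars (p.1 + 1))) acc
    = acc ++ pvTailPart (l.map (pvTrm objective)) := by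
  induction l generalizing acc with
  | nil => simp [pvTailPart]
  | cons p l ih =>
      rw [List.foldl_cons]
      have hterm : (PySem.Int.toChars p.2 ++ ['*'] ++
          (if objective == "min" then ['x'] else ['y']) ++ PySem.Int.toChars (p.1 + 1)) =
          pvTrm objective p := by
        unfold pvTrm; simp [List.append_assoc]
      rw [hterm]
      have hne : acc.isEmpty = false := List.isEmpty_eq_false_iff.mpr hacc
      rw [hne]
      simp only [Bool.false_eq_true, if_false]
      rw [startswith_pvTrm]
      rw [PySem.List.slice_from (pvTrm objective p) (by norm_num)]
      by_cases hneg : p.2 < 0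
      · rw [if_pos (show decide (p.2 < 0) = true from decide_eq_true hneg)]
        rw [ih _ (by simp)]
        have hhd : (pvTrm objective p).head? = some '-' := by
          rw [head?_pvTrm, head?_toChars]; exact hneg
        simp [pvTailPart, hhd, List.drop_one]
      · rw [if_neg (show ¬ (decide (p.2 < 0) = true) from by simp [hneg])]
        rw [ih _ (by simp)]
        have hhd : ¬ ((pvTrm objective p).head? = some '-') := by
          rw [head?_pvTrm, head?_toChars]; exact hneg
        simp [pvTailPart, hhd]

-- the two bodies agree
theorem pvBody_eq (coeffs : List Int) (objective : String) :
    PySem.Chars.replace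
      (PySem.Chars.join [' ', '+', ' ']
        ((PySem.List.enumerate coeffs 0).map
          (fun p => PySem.Int.toChars p.2 ++ ['*'] ++ get_variable_name p.1 objective)))
      ['+', ' ', '-'] ['-', ' ']
    = (PySem.List.enumerate coeffs 0).foldl
        (fun body p =>
          let term := PySem.Int.toChars p.2 ++ ['*'] ++
            (if objective == "min" then ['x'] else ['y']) ++ PySem.Int.toChars (p.1 + 1)
          if body.isEmpty then term
          else if PySem.Chars.startswith term ['-'] then
            body ++ [' ', '-', ' '] ++ PySem.List.slice term (some 1) none
          else body ++ [' ', '+', ' '] ++ term) [] := by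
  have htrm : (fun p : Int × Int =>
      PySem.Int.toChars p.2 ++ ['*'] ++ get_variable_name p.1 objective) = pvTrm objective := by
    funext p; unfold pvTrm get_variable_name; rfl
  rw [htrm]
  cases henum : PySem.List.enumerate coeffs 0 with
  | nil =>
      rw [List.map_nil, PySem.Chars.join_nil, pvReplace_eq]
      rfl
  | cons p l =>
      rw [List.map_cons, pvJoin_eq, pvReplace_eq,
        pvRepl_append (pvTrm objective p) _ (plus_not_mem_pvTrm objective p),
        pvRepl_joinRest _ (by
          intro t ht
          obtain ⟨q, _, hq⟩ := List.mem_map.mp ht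
          exact hq ▸ ⟨pvTrm_ne_nil objective q, plus_not_mem_pvTrm objective q⟩)]
      rw [List.foldl_cons]
      have hterm : (PySem.Int.toChars p.2 ++ ['*'] ++
          (if objective == "min" then ['x'] else ['y']) ++ PySem.Int.toChars (p.1 + 1)) =
          pvTrm objective p := by
        unfold pvTrm; simp [List.append_assoc]
      rw [if_pos (show (List.isEmpty ([] : List Char)) = true from rfl)]
      rw [hterm]
      exact (pvFold_invariant objective l (pvTrm objective p) (pvTrm_ne_nil objective p)).symm

-- ===== VERDICT (by name: the statement is the Claim_ definition above) =====
theorem display_function_spec : Claim_equal_display_function := by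
  intro coeffs objective free_coeff _
  unfold Spec_display_function display_function display_function_alt
  dsimp only
  rw [pvBody_eq coeffs objective]
  congr 1
  by_cases h0 : free_coeff = 0
  · simp [h0]
  · by_cases hpos : free_coeff > 0
    · simp [h0, hpos]
    · simp [h0, hpos]
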